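-- pv_equiv track=rewrite | github.com/Adi-M02/vocal_disorder | results_with_vocabulary/inital_analyses.py | build_term_index
-- ===== SOURCE A (Python) =====
-- import argparse, json, math, itertools, collections, pathlib, csv, os
-- from typing import List, Dict, Tuple, Iterable, Counter
--
-- def build_term_index(terms: Iterable[str]):
--     """Return dict: first_token → list[ (token_len, term) ] sorted by len desc."""
--     idx: Dict[str, List[Tuple[int, str]]] = collections.defaultdict(list)
--     for term in terms:
--         toks = term.split()
--         idx[toks[0]].append((len(toks), term))
--     for tok in idx:
--         idx[tok].sort(reverse=True)      # longest first
--     return idx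
-- ===== SOURCE B (Python) =====
-- import collections
--
-- def build_term_index(terms):
--     """Return dict: first_token -> list[(token_len, term)] sorted by len desc."""
--     entries = [(term.split(), term) for term in terms]
--     idx = {toks[0]: [] for toks, _ in entries}          # keys in first-appearance order
--     # one global descending sort on (token_len, term); each bucket then fills in order
--     for toks, term in sorted(entries, key=lambda e: (len(e[0]), e[1]), reverse=True):
--         idx[toks[0]].append((len(toks), term))
--     return idx
-- ===== Notes on version B (the rewrite author's own statement) =====
-- stated objective: alternative
-- what changed: Instead of grouping first and then reverse-sorting every bucket separately, B performs one global descending sort of all (token_len, term) entries and then distributes them into buckets pre-created in first-appearance key order, so each bucket is filled already sorted.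
import Mathlib
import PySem

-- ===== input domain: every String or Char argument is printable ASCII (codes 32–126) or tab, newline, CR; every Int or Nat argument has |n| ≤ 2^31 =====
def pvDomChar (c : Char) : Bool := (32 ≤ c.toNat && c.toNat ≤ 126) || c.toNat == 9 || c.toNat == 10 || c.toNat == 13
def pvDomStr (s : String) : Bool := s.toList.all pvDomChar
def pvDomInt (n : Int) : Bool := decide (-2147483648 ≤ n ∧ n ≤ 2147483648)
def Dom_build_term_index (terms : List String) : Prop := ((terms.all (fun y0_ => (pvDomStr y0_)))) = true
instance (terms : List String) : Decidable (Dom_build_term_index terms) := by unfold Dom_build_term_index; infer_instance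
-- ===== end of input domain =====

-- B replaces A's per-bucket reverse sorts by ONE global descending sort on (token_len, term)
-- followed by a distribution pass into pre-created buckets (objective: alternative decomposition).

-- ===== PORT A =====
-- `toks[0]` raises IndexError when the split is empty; Pre_ excludes that, so `headD ""` is never reached as a default.
def build_term_index (terms : List String) : List (String × List (Int × String)) :=
  let idx : PySem.Dict String (List (Int × String)) :=
    terms.foldl (fun d term =>
      let toks := PySem.Str.split₀ term
      d.modify (toks.headD "") [] (fun l => l ++ [((toks.length : Int), term)]))
      PySem.Dict.empty
  let idx2 := idx.keys.foldl (fun d tok =>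
      d.insert tok (PySem.List.sorted2 (d.getD tok []) (fun p => p.1) (fun p => p.2) true)) idx
  idx2.items

-- ===== PORT B =====
-- `idx[toks[0]].append(...)`: the key is always present (primed from the same entries), so it is the
-- same dict operation as modify-with-default; `toks[0]` raises on an empty split exactly as in Source B (Pre_).
def build_term_index_alt (terms : List String) : List (String × List (Int × String)) :=
  let entries := terms.map (fun term => (PySem.Str.split₀ term, term))
  let idx : PySem.Dict String (List (Int × String)) :=
    PySem.Dict.ofList (entries.map (fun e => (e.1.headD "", ([] : List (Int × String)))))
  let sortedE := PySem.List.sorted2 entries (fun e => ((e.1.length : Int))) (fun e => e.2) true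
  (sortedE.foldl (fun d e =>
      d.modify (e.1.headD "") [] (fun l => l ++ [((e.1.length : Int), e.2)])) idx).items

-- ===== PRECONDITION & SPEC =====
-- Pre_ excludes exactly the inputs where the Python raises: a term whose .split() is empty
-- (empty or all-whitespace string) makes toks[0] raise IndexError in A (and in B).
def Pre_build_term_index (terms : List String) : Prop :=
  ∀ t ∈ terms, PySem.Str.split₀ t ≠ []
instance (terms : List String) : Decidable (Pre_build_term_index terms) := by
  unfold Pre_build_term_index; infer_instance

def pvWitness_build_term_index : List String := ["a b", "a", "c d e", "a b", "b a c"]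

def Spec_build_term_index (terms : List String) (out : List (String × List (Int × String))) : Prop := out = build_term_index_alt terms
instance (terms : List String) (out : List (String × List (Int × String))) : Decidable (Spec_build_term_index terms out) := by unfold Spec_build_term_index; infer_instance

-- ===== CLAIM (what is proved, stated in full; the proofs are below) =====
def Claim_equal_build_term_index : Prop := ∀ (terms : List String), Dom_build_term_index terms → Pre_build_term_index terms → Spec_build_term_index terms (build_term_index terms)

-- ===== LEMMAS AND PROOFS =====

-- first token of a term, and its (token_len, term) value
def fkey (t : String) : String := (PySem.Str.split₀ t).headD ""
def gval (t : String) : Int × String := (((PySem.Str.split₀ t).length : Int), t)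
-- CPython's tuple-lex "less than" test used by sorted2 on a two-component key
def ltk {α κ₁ κ₂ : Type} [LinearOrder κ₁] [LinearOrder κ₂] (k1 : α → κ₁) (k2 : α → κ₂) (a b : α) : Bool :=
  decide (k1 a < k1 b) || (!decide (k1 b < k1 a) && decide (k2 a < k2 b))

lemma ltk_iff {α κ₁ κ₂ : Type} [LinearOrder κ₁] [LinearOrder κ₂] (k1 : α → κ₁) (k2 : α → κ₂) (a b : α) :
    ltk k1 k2 a b = true ↔ (k1 a < k1 b ∨ (k1 a = k1 b ∧ k2 a < k2 b)) := by
  simp only [ltk, Bool.or_eq_true, Bool.and_eq_true, Bool.not_eq_true', decide_eq_true_eq,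
    decide_eq_false_iff_not]
  constructor
  · rintro (h | ⟨h1, h2⟩)
    · exact Or.inl h
    · rcases (not_lt.mp h1).lt_or_eq with hl | he
      · exact Or.inl hl
      · exact Or.inr ⟨he, h2⟩
  · rintro (h | ⟨h1, h2⟩)
    · exact Or.inl h
    · exact Or.inr ⟨by rw [h1]; exact lt_irrefl _, h2⟩

lemma ltk_asymm {α κ₁ κ₂ : Type} [LinearOrder κ₁] [LinearOrder κ₂] (k1 : α → κ₁) (k2 : α → κ₂)
    (a b : α) (h : ltk k1 k2 a b = true) : ltk k1 k2 b a = false := by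
  rw [ltk_iff] at h
  rw [Bool.eq_false_iff, Ne, ltk_iff]
  rcases h with h | ⟨h1, h2⟩ <;> rintro (g | ⟨g1, g2⟩)
  · exact lt_asymm h g
  · exact absurd h (by rw [g1]; exact lt_irrefl _)
  · exact absurd g (by rw [h1]; exact lt_irrefl _)
  · exact lt_asymm h2 g2

lemma ltk_trans {α κ₁ κ₂ : Type} [LinearOrder κ₁] [LinearOrder κ₂] (k1 : α → κ₁) (k2 : α → κ₂)
    (a b c : α) (h1 : ltk k1 k2 a b = true) (h2 : ltk k1 k2 b c = true) : ltk k1 k2 a c = true := by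
  rw [ltk_iff] at h1 h2 ⊢
  rcases h1 with h1 | ⟨e1, l1⟩ <;> rcases h2 with h2 | ⟨e2, l2⟩
  · exact Or.inl (lt_trans h1 h2)
  · exact Or.inl (e2 ▸ h1)
  · exact Or.inl (lt_of_le_of_lt (le_of_eq e1) h2)
  · exact Or.inr ⟨e1.trans e2, lt_trans l1 l2⟩

lemma ltk_false_antisymm (a b : Int × String)
    (hab : ltk (fun p : Int × String => p.1) (fun p => p.2) a b = false)
    (hba : ltk (fun p : Int × String => p.1) (fun p => p.2) b a = false) : a = b := by
  rw [Bool.eq_false_iff, Ne, ltk_iff] at hab hba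
  push Not at hab hba
  have h1 : a.1 = b.1 := le_antisymm hba.1 hab.1
  have h2 : a.2 = b.2 := le_antisymm (hba.2 h1.symm) (hab.2 h1)
  exact Prod.ext h1 h2

-- insertion keeps the "descending w.r.t. before" invariant
lemma pairwise_insertBy {α : Type} (before : α → α → Bool)
    (asym : ∀ a b, before a b = true → before b a = false)
    (trans : ∀ a b c, before a b = true → before b c = true → before a c = true)
    (x : α) (acc : List α) (h : acc.Pairwise (fun a b => before b a = false)) :
    (PySem.List.insertBy before x acc).Pairwise (fun a b => before b a = false) := by
  induction acc with
  | nil => simp [PySem.List.insertBy]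
  | cons y ys ih =>
    rcases List.pairwise_cons.mp h with ⟨hy, hys⟩
    by_cases hxy : before x y = true
    · rw [PySem.List.insertBy, if_pos hxy]
      refine List.pairwise_cons.mpr ⟨?_, h⟩
      intro z hz
      rcases List.mem_cons.mp hz with rfl | hz
      · exact asym _ _ hxy
      · rcases Bool.eq_false_or_eq_true (before z x) with hzx | hzx
        · exact absurd (trans _ _ _ hzx hxy) (by rw [hy z hz]; simp)
        · exact hzx
    · rw [PySem.List.insertBy, if_neg hxy]
      refine List.pairwise_cons.mpr ⟨?_, ih hys⟩
      intro z hz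
      rcases (PySem.List.mem_insertBy before x z ys).mp hz with rfl | hz
      · exact Bool.eq_false_iff.mpr hxy
      · exact hy z hz

lemma pairwise_foldl_insertBy {α : Type} (before : α → α → Bool)
    (asym : ∀ a b, before a b = true → before b a = false)
    (trans : ∀ a b c, before a b = true → before b c = true → before a c = true)
    (xs : List α) : ∀ (acc : List α), acc.Pairwise (fun a b => before b a = false) →
    (xs.foldl (fun acc x => PySem.List.insertBy before x acc) acc).Pairwise (fun a b => before b a = false) := by
  induction xs with
  | nil => intro acc h; simpa using h
  | cons x xs ih =>
    intro acc h
    exact ih _ (pairwise_insertBy before asym trans x acc h)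

-- the result of a reverse sorted2 is pairwise descending in the tuple key
lemma sorted2_rev_pairwise {α κ₁ κ₂ : Type} [LinearOrder κ₁] [LinearOrder κ₂]
    (k1 : α → κ₁) (k2 : α → κ₂) (xs : List α) :
    (PySem.List.sorted2 xs k1 k2 true).Pairwise (fun a b => ltk k1 k2 a b = false) := by
  have := pairwise_foldl_insertBy (fun a b => ltk k1 k2 b a)
    (fun a b h => ltk_asymm k1 k2 b a h)
    (fun a b c h1 h2 => ltk_trans k1 k2 c b a h2 h1)
    xs [] (List.Pairwise.nil)
  exact this

-- the two bucket computations coincide: sorting one bucket descending = filtering the globally sorted list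
lemma bucket_eq (terms : List String) (k : String) :
    PySem.List.sorted2 ((terms.filter (fun t => fkey t == k)).map gval) (fun p => p.1) (fun p => p.2) true
      = ((PySem.List.sorted2 (terms.map (fun t => (PySem.Str.split₀ t, t)))
            (fun e => ((e.1.length : Int))) (fun e => e.2) true).filter
          (fun e => e.1.headD "" == k)).map (fun e => (((e.1.length : Int)), e.2)) := by
  have hfm : (terms.map (fun t => (PySem.Str.split₀ t, t))).filter (fun e => e.1.headD "" == k)
      = (terms.filter (fun t => fkey t == k)).map (fun t => (PySem.Str.split₀ t, t)) := by
    rw [List.filter_map]; rfl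
  have h2 : ((terms.map (fun t => (PySem.Str.split₀ t, t))).filter (fun e => e.1.headD "" == k)).map
      (fun e => (((e.1.length : Int)), e.2)) = (terms.filter (fun t => fkey t == k)).map gval := by
    rw [hfm, List.map_map]; rfl
  have hperm : (PySem.List.sorted2 ((terms.filter (fun t => fkey t == k)).map gval)
      (fun p => p.1) (fun p => p.2) true).Perm
      (((PySem.List.sorted2 (terms.map (fun t => (PySem.Str.split₀ t, t)))
          (fun e => ((e.1.length : Int))) (fun e => e.2) true).filter
        (fun e => e.1.headD "" == k)).map (fun e => (((e.1.length : Int)), e.2))) := by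
    refine (PySem.List.sorted2_perm _ _ _ _).trans ?_
    rw [← h2]
    exact (((PySem.List.sorted2_perm _ _ _ true).filter _).map _).symm
  exact List.Perm.eq_of_pairwise
    (fun a b _ _ hab hba => ltk_false_antisymm a b hab hba)
    (sorted2_rev_pairwise _ _ _)
    (List.pairwise_map.mpr ((sorted2_rev_pairwise _ _ _).filter _))
    hperm

-- characterisation of A's grouping dict
def idxA (terms : List String) : PySem.Dict String (List (Int × String)) :=
  terms.foldl (fun d t => d.modify (fkey t) [] (fun l => l ++ [gval t])) PySem.Dict.empty

lemma keysA (terms : List String) : (idxA terms).keys = PySem.Set.ofList (terms.map fkey) := by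
  unfold idxA
  rw [PySem.Dict.keys_foldl_modify_key terms fkey [] (fun _ t => fun l => l ++ [gval t]) PySem.Dict.empty]
  rw [PySem.Dict.keys_empty, PySem.Set.ofList_eq_foldl]
  rfl

lemma nodup_keysA (terms : List String) : (idxA terms).keys.Nodup := by
  unfold idxA
  exact PySem.Dict.nodup_keys_foldl_modify_key terms fkey [] (fun _ t => fun l => l ++ [gval t])
    PySem.Dict.empty PySem.Dict.nodup_keys_empty

lemma getDA (terms : List String) (k : String) :
    (idxA terms).getD k [] = (terms.filter (fun t => fkey t == k)).map gval := by
  have h : idxA terms = (terms.map (fun t => (fkey t, gval t))).foldl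
      (fun d p => d.modify p.1 [] (fun l => l ++ [p.2])) PySem.Dict.empty := by
    rw [List.foldl_map]; rfl
  rw [h, PySem.Dict.getD_foldl_modify_append, PySem.Dict.getD_empty, List.filter_map, List.map_map]
  rfl

-- second loop of A: re-inserting a transformed value at every existing key maps over the items
lemma items_foldl_insert_F (F : String → List (Int × String) → List (Int × String)) :
    ∀ (ks : List String) (d : PySem.Dict String (List (Int × String))),
    ks.Nodup → d.keys.Nodup → (∀ k ∈ ks, d.contains k = true) →
    (ks.foldl (fun d tok => d.insert tok (F tok (d.getD tok []))) d).items
      = d.items.map (fun p => if p.1 ∈ ks then (p.1, F p.1 p.2) else p) := by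
  intro ks
  induction ks with
  | nil => intro d _ _ _; simp
  | cons tok ks ih =>
    intro d hnd hkeys hcont
    rcases List.nodup_cons.mp hnd with ⟨htok, hndks⟩
    have hct : d.contains tok = true := hcont tok (List.mem_cons_self ..)
    have hitems : (d.insert tok (F tok (d.getD tok []))).items
        = d.items.map (fun p => if p.1 == tok then (tok, F tok (d.getD tok [])) else p) :=
      PySem.Dict.items_insert_of_contains d _ hct
    have hkeys' : (d.insert tok (F tok (d.getD tok []))).keys = d.keys :=
      PySem.Dict.keys_insert_of_contains d _ hct
    rw [List.foldl_cons, ih _ hndks (by rw [hkeys']; exact hkeys)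
      (fun k hk => by
        rw [PySem.Dict.contains_iff_mem_keys, hkeys', ← PySem.Dict.contains_iff_mem_keys]
        exact hcont k (List.mem_cons_of_mem _ hk)), hitems, List.map_map]
    refine List.map_congr_left ?_
    intro p hp
    by_cases hpt : p.1 = tok
    · have hged : d.getD tok [] = p.2 := by
        have : (tok, p.2) ∈ d.items := by rw [← hpt]; exact hp
        exact PySem.Dict.getD_of_mem_items d this hkeys []
      simp only [Function.comp_apply, hpt, beq_self_eq_true, if_pos, List.mem_cons, hged]
      simp [htok]
    · have : (p.1 == tok) = false := beq_eq_false_iff_ne.mpr hpt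
      simp only [Function.comp_apply, this, Bool.false_eq_true, if_false, List.mem_cons]
      by_cases hks : p.1 ∈ ks <;> simp [hks, hpt]

lemma A_char (terms : List String) : build_term_index terms
    = (PySem.Set.ofList (terms.map fkey)).map (fun k => (k,
        PySem.List.sorted2 ((terms.filter (fun t => fkey t == k)).map gval)
          (fun p => p.1) (fun p => p.2) true)) := by
  show ((idxA terms).keys.foldl (fun d tok =>
      d.insert tok (PySem.List.sorted2 (d.getD tok []) (fun p => p.1) (fun p => p.2) true))
      (idxA terms)).items = _
  rw [items_foldl_insert_F (fun _ l => PySem.List.sorted2 l (fun p => p.1) (fun p => p.2) true)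
    (idxA terms).keys (idxA terms) (nodup_keysA terms) (nodup_keysA terms)
    (fun k hk => (PySem.Dict.contains_iff_mem_keys _ _).mpr hk)]
  rw [PySem.Dict.items_eq_map_keys (idxA terms) (nodup_keysA terms) [], List.map_map]
  rw [keysA]
  refine List.map_congr_left ?_
  intro k hk
  simp only [Function.comp_apply]
  rw [if_pos hk, getDA]

-- B-side characterisation
lemma getD_update_nil : ∀ (ps : List (String × List (Int × String)))
    (d : PySem.Dict String (List (Int × String))), (∀ p ∈ ps, p.2 = ([] : List (Int × String))) →
    (∀ k', d.getD k' [] = []) → ∀ k, (d.update ps).getD k [] = [] := by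
  intro ps
  induction ps with
  | nil => intro d _ hd k; exact hd k
  | cons p ps ih =>
    intro d hps hd k
    show ((d.insert p.1 p.2).update ps).getD k [] = []
    refine ih _ (fun q hq => hps q (List.mem_cons_of_mem _ hq)) ?_ k
    intro k'
    rw [PySem.Dict.getD_insert]
    split_ifs with h
    · exact hps p (List.mem_cons_self ..)
    · exact hd k'

lemma set_update_eq_of_subset {s : PySem.Set String} {xs : List String}
    (h : ∀ x ∈ xs, x ∈ s) : PySem.Set.update s xs = s := by
  induction xs generalizing s with
  | nil => rfl
  | cons x xs ih =>
    show PySem.Set.update (s.add x) xs = s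
    have hadd : s.add x = s := by
      have : PySem.Set.contains s x = true :=
        List.elem_eq_true_of_mem (h x (List.mem_cons_self ..))
      rw [PySem.Set.add, if_pos this]
    rw [hadd]
    exact ih (fun y hy => h y (List.mem_cons_of_mem _ hy))

lemma B_char (terms : List String) : build_term_index_alt terms
    = (PySem.Set.ofList (terms.map fkey)).map (fun k => (k,
        ((PySem.List.sorted2 (terms.map (fun t => (PySem.Str.split₀ t, t)))
            (fun e => ((e.1.length : Int))) (fun e => e.2) true).filter
          (fun e => e.1.headD "" == k)).map (fun e => (((e.1.length : Int)), e.2)))) := by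
  have hkeymap : ((terms.map (fun t => (PySem.Str.split₀ t, t))).map
      (fun e => (e.1.headD "", ([] : List (Int × String))))).map Prod.fst = terms.map fkey := by
    rw [List.map_map, List.map_map]; rfl
  set E := terms.map (fun t => (PySem.Str.split₀ t, t)) with hE
  set idx0 := PySem.Dict.ofList (E.map (fun e => (e.1.headD "", ([] : List (Int × String))))) with hidx0
  set sortedE := PySem.List.sorted2 E (fun e => ((e.1.length : Int))) (fun e => e.2) true with hsE
  have hkeys0 : idx0.keys = PySem.Set.ofList (terms.map fkey) := by
    rw [hidx0]
    show (PySem.Dict.empty.update (E.map (fun e => (e.1.headD "", ([] : List (Int × String)))))).keys = _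
    show ((E.map (fun e => (e.1.headD "", ([] : List (Int × String))))).foldl
      (fun acc p => acc.insert p.1 p.2) PySem.Dict.empty).keys = _
    rw [PySem.Dict.keys_foldl_insert_key _ Prod.fst (fun _ p => p.2) PySem.Dict.empty]
    rw [PySem.Dict.keys_empty, hkeymap, PySem.Set.ofList_eq_foldl]
    rfl
  have hnodup0 : idx0.keys.Nodup := PySem.Dict.nodup_keys_ofList _
  have hgetD0 : ∀ k, idx0.getD k [] = [] := by
    intro k
    refine getD_update_nil _ PySem.Dict.empty (by simp) (fun k' => PySem.Dict.getD_empty k' []) k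
  set dB := sortedE.foldl (fun d e =>
      d.modify (e.1.headD "") [] (fun l => l ++ [((e.1.length : Int), e.2)])) idx0 with hdB
  have hkeysB : dB.keys = PySem.Set.ofList (terms.map fkey) := by
    rw [hdB, PySem.Dict.keys_foldl_modify_key sortedE (fun e => e.1.headD "") []
      (fun _ e => fun l => l ++ [((e.1.length : Int), e.2)]) idx0, hkeys0]
    refine set_update_eq_of_subset ?_
    intro x hx
    rcases List.mem_map.mp hx with ⟨e, he, rfl⟩
    have heE : e ∈ E := (PySem.List.sorted2_perm E _ _ true).subset he
    rcases List.mem_map.mp heE with ⟨t, ht, rfl⟩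
    exact (PySem.Set.mem_ofList _ _).mpr (List.mem_map.mpr ⟨t, ht, rfl⟩)
  have hnodupB : dB.keys.Nodup := by
    rw [hdB]
    exact PySem.Dict.nodup_keys_foldl_modify_key sortedE (fun e => e.1.headD "") []
      (fun _ e => fun l => l ++ [((e.1.length : Int), e.2)]) idx0 hnodup0
  have hgetDB : ∀ k, dB.getD k []
      = (sortedE.filter (fun e => e.1.headD "" == k)).map (fun e => (((e.1.length : Int)), e.2)) := by
    intro k
    have h : dB = (sortedE.map (fun e => (e.1.headD "", (((e.1.length : Int)), e.2)))).foldl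
        (fun d p => d.modify p.1 [] (fun l => l ++ [p.2])) idx0 := by
      rw [hdB, List.foldl_map]
    rw [h, PySem.Dict.getD_foldl_modify_append, hgetD0, List.filter_map, List.map_map]
    rfl
  show dB.items = _
  rw [PySem.Dict.items_eq_map_keys dB hnodupB [], hkeysB]
  refine List.map_congr_left ?_
  intro k _
  rw [hgetDB]

-- ===== VERDICT (by name: the statement is the Claim_ definition above) =====
theorem build_term_index_spec : Claim_equal_build_term_index := by
  intro terms _ _
  show build_term_index terms = build_term_index_alt terms
  rw [A_char, B_char]
  refine List.map_congr_left ?_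
  intro k _
  rw [bucket_eq]
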